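-- pv_equiv track=rewrite | github.com/alexandraback/datacollection | solutions_5634697451274240_1/Python/theFreightTrain/prob2.py | howManyFlips
-- ===== SOURCE A (Python) =====
-- def reverse(stack):
--     newStack = ''
--     for i in range(1,len(stack)+1):
--         newStack += '+' if stack[-i]=='-' else '-'
--     return newStack
--
-- def badFlip(stack):
--     newStack = ''
--     i = 0
--     while(stack[i]=='+'):
--         newStack+='-'
--         i+= 1
--     return newStack + stack[i:]
--
-- def howManyFlips(stack):
--     if (len(stack)==0):
--         return 0
--     elif (stack[-1]=='-' and stack[0]=='-'):
--         return 1 + howManyFlips(reverse(stack)[:-1])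
--     elif (stack[-1]=='-' and stack[0]=='+'):
--         return 1 + howManyFlips(badFlip(stack))
--     else:
--         return howManyFlips(stack[:-1])
-- ===== SOURCE B (Python) =====
-- def howManyFlips(stack):
--     # One pass: trailing non-'-' characters are never touched by any flip, so
--     # strip them; then the answer is a base cost decided by the first character
--     # plus 2 per maximal run of non-'-' characters in the remainder.
--     n = len(stack)
--     while n and stack[n - 1] != '-':
--         n -= 1
--     t = stack[:n]
--     if not t:
--         return 0
--     if t[0] == '-':
--         base = 1
--         rest = t[1:]
--     elif t[0] == '+':
--         base = 2
--         rest = t.lstrip('+')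
--     else:
--         return 0
--     blocks = 0
--     prev_minus = True
--     for ch in rest:
--         if ch != '-' and prev_minus:
--             blocks += 1
--         prev_minus = ch == '-'
--     return base + 2 * blocks
-- ===== Notes on version B (the rewrite author's own statement) =====
-- stated objective: faster
-- what changed: Replaces the O(n^2) flip-simulating recursion (which rebuilds the string at every step) by a single linear scan: strip the trailing run of non-minus characters, pick a base cost from the first remaining character, and count the maximal runs of non-minus characters once.
import Mathlib
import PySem

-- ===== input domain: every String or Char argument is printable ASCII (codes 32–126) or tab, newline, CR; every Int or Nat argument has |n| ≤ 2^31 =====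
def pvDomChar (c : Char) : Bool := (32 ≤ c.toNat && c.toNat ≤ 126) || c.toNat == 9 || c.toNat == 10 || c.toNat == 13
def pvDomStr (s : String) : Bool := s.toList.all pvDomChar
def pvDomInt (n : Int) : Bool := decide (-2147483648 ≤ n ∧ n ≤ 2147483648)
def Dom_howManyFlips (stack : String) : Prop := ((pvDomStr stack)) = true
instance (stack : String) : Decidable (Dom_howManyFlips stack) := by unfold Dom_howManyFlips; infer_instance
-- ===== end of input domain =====

-- B replaces A's quadratic flip-simulating recursion by one linear scan (strip the
-- trailing run of characters other than minus, then a base cost decided by the first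
-- character plus 2 per maximal run of non-minus characters); same value on every string.

-- ===== PORT A =====

-- reverse(stack): the loop "for i in range(1, len(stack)+1): newStack += '+' if stack[-i]=='-' else '-'"
def reverseA (stack : List Char) : List Char :=
  (PySem.List.pyRange 1 ((stack.length : Int) + 1)).foldl
    (fun newStack i => newStack ++ [if PySem.List.pyGetD stack (-i) ' ' = '-' then '+' else '-']) []

-- badFlip(stack): the while loop over index i, accumulating newStack; the [] case is
-- where Python would raise IndexError (never reached from howManyFlips, whose calls
-- always leave a '-' in the string).
def badFlipGo (newStack : List Char) : List Char → List Char
  | [] => newStack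
  | c :: rest => if c = '+' then badFlipGo (newStack ++ ['-']) rest else newStack ++ c :: rest

def badFlipA (stack : List Char) : List Char := badFlipGo [] stack

-- facts cited by howManyFlipsL's decreasing_by
theorem pvLen_reverseA (v : List Char) : (reverseA v).length = v.length := by
  unfold reverseA
  rw [PySem.List.foldl_append_singleton_eq_map]
  simp

theorem pvBadFlipGo_spec : ∀ (l ns : List Char),
    badFlipGo ns l =
      ns ++ List.replicate (l.takeWhile (fun c => c == '+')).length '-'
         ++ l.dropWhile (fun c => c == '+') := by
  intro l
  induction l with
  | nil => intro ns; simp [badFlipGo]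
  | cons c rest ih =>
      intro ns
      by_cases h : c = '+'
      · subst h
        simp only [badFlipGo, ih]
        simp [List.replicate_succ]
      · simp [badFlipGo, h]

theorem pvBadFlipA_eq (l : List Char) :
    badFlipA l = List.replicate (l.takeWhile (fun c => c == '+')).length '-'
      ++ l.dropWhile (fun c => c == '+') := by
  unfold badFlipA
  rw [pvBadFlipGo_spec]
  simp

theorem pvBadFlip_length (l : List Char) : (badFlipA l).length = l.length := by
  rw [pvBadFlipA_eq]
  have h := congrArg List.length
    (List.takeWhile_append_dropWhile (p := fun c => c == '+') (l := l))
  rw [List.length_append] at h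
  rw [List.length_append, List.length_replicate]
  omega

theorem pvBadFlipGo_head : ∀ (l : List Char) (c : Char) (ns : List Char),
    (badFlipGo (c :: ns) l).head? = some c := by
  intro l
  induction l with
  | nil => intro c ns; simp [badFlipGo]
  | cons d rest ih =>
      intro c ns
      by_cases h : d = '+'
      · subst h
        simpa [badFlipGo] using ih c (ns ++ ['-'])
      · simp [badFlipGo, h]

theorem pvBadFlip_head (l : List Char) (h : l.head? = some '+') :
    (badFlipA l).head? = some '-' := by
  cases l with
  | nil => simp at h
  | cons c w =>
      simp at h
      subst h
      show (badFlipGo [] ('+' :: w)).head? = some '-'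
      simp only [badFlipGo, List.nil_append]
      exact pvBadFlipGo_head w '-' []

-- howManyFlips(stack), the recursion of A
def howManyFlipsL (stack : List Char) : Int :=
  if h0 : stack.length = 0 then 0
  else if h1 : PySem.List.pyGetD stack (-1) ' ' = '-' ∧ PySem.List.pyGetD stack 0 ' ' = '-' then
    1 + howManyFlipsL (PySem.List.slice (reverseA stack) none (some (-1)))
  else if h2 : PySem.List.pyGetD stack (-1) ' ' = '-' ∧ PySem.List.pyGetD stack 0 ' ' = '+' then
    1 + howManyFlipsL (badFlipA stack)
  else
    howManyFlipsL (PySem.List.slice stack none (some (-1)))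
termination_by 2 * stack.length + (if stack.head? = some '+' then 1 else 0)
decreasing_by
  · rw [PySem.List.slice_to_neg_one]
    simp only [List.length_dropLast, pvLen_reverseA]
    split_ifs <;> omega
  · have hl := pvBadFlip_length stack
    have hne : stack ≠ [] := by
      intro h; subst h; exact h0 rfl
    have hhd : stack.head? = some '+' := by
      cases stack with
      | nil => exact absurd rfl hne
      | cons d w =>
          rw [PySem.List.pyGetD_zero_cons] at h2
          simp [h2.2]
    have hbf := pvBadFlip_head stack hhd
    rw [hbf, hhd]
    simp
    omega
  · rw [PySem.List.slice_to_neg_one]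
    simp only [List.length_dropLast]
    split_ifs <;> omega

def howManyFlips (stack : String) : Int := howManyFlipsL stack.toList

-- ===== PORT B =====

-- the body of Source B's counting loop: state = (blocks, prev_minus)
def pvStep (bp : Int × Bool) (ch : Char) : Int × Bool :=
  (if ch ≠ '-' ∧ bp.2 then bp.1 + 1 else bp.1, ch == '-')

def pvBlocks (rest : List Char) : Int := (rest.foldl pvStep (0, true)).1

-- what Source B does after the strip: base from the first character + 2 per block
def pvAltCore (t : List Char) : Int :=
  match t with
  | [] => 0
  | c :: rest =>
      if c = '-' then 1 + 2 * pvBlocks rest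
      else if c = '+' then 2 + 2 * pvBlocks ((c :: rest).dropWhile (fun d => d == '+'))
      else 0

-- the right-to-left n-decrementing while loop of Source B = drop the trailing non-'-' run
def howManyFlips_altL (s : List Char) : Int :=
  pvAltCore ((s.reverse.dropWhile (fun c => c != '-')).reverse)

def howManyFlips_alt (stack : String) : Int := howManyFlips_altL stack.toList

-- ===== PRECONDITION & SPEC =====
def Spec_howManyFlips (stack : String) (out : Int) : Prop := out = howManyFlips_alt stack
instance (stack : String) (out : Int) : Decidable (Spec_howManyFlips stack out) := by unfold Spec_howManyFlips; infer_instance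

-- ===== CLAIM (what is proved, stated in full; the proofs are below) =====
def Claim_equal_howManyFlips : Prop := ∀ (stack : String), Dom_howManyFlips stack → Spec_howManyFlips stack (howManyFlips stack)

-- ===== LEMMAS AND PROOFS =====

-- character classes and run counting used by the proofs
def pvFlip (c : Char) : Char := if c = '-' then '+' else '-'
def pvM (c : Char) : Bool := c == '-'
def pvQ (c : Char) : Bool := c != '-'

-- number of maximal runs of p-satisfying chars, prev = "previous char satisfied p"
def pvRuns (p : Char → Bool) : Bool → List Char → Nat
  | _, [] => 0
  | prev, c :: l => (if p c && !prev then 1 else 0) + pvRuns p (p c) l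

theorem pvRuns_cons (p : Char → Bool) (b : Bool) (c : Char) (l : List Char) :
    pvRuns p b (c :: l) = (if p c && !b then 1 else 0) + pvRuns p (p c) l := rfl

def pvState (p : Char → Bool) (b : Bool) (l : List Char) : Bool :=
  l.foldl (fun _ c => p c) b

theorem pvState_append (p : Char → Bool) (b : Bool) (l l' : List Char) :
    pvState p b (l ++ l') = pvState p (pvState p b l) l' := by
  simp [pvState, List.foldl_append]

theorem pvState_singleton (p : Char → Bool) (b : Bool) (c : Char) :
    pvState p b [c] = p c := rfl

theorem pvRuns_append (p : Char → Bool) : ∀ (l l' : List Char) (b : Bool),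
    pvRuns p b (l ++ l') = pvRuns p b l + pvRuns p (pvState p b l) l' := by
  intro l
  induction l with
  | nil => intro l' b; simp [pvRuns, pvState]
  | cons c m ih =>
      intro l' b
      simp only [List.cons_append, pvRuns_cons, ih]
      have h : pvState p b (c :: m) = pvState p (p c) m := rfl
      rw [h]
      omega

theorem pvRuns_false_true (p : Char → Bool) (c : Char) (l : List Char) (h : p c = true) :
    pvRuns p false (c :: l) = 1 + pvRuns p true (c :: l) := by
  simp [pvRuns_cons, h]

theorem pvRuns_false_true' (p : Char → Bool) (c : Char) (l : List Char) (h : p c = false) :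
    pvRuns p false (c :: l) = pvRuns p true (c :: l) := by
  simp [pvRuns_cons, h]

theorem pvRuns_reverse (p : Char → Bool) : ∀ (l : List Char),
    pvRuns p false l.reverse = pvRuns p false l := by
  intro l
  induction l with
  | nil => rfl
  | cons c m ih =>
      cases m with
      | nil => rfl
      | cons d m' =>
          rw [List.reverse_cons, pvRuns_append, ih]
          have hst : pvState p false (d :: m').reverse = p d := by
            rw [List.reverse_cons, pvState_append, pvState_singleton]
          rw [hst]
          by_cases hc : p c = true
          · by_cases hd : p d = true
            · have h2 : pvRuns p (p d) [c] = 0 := by simp [pvRuns, hd, hc]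
              rw [h2]
              have h3 : pvRuns p false (c :: d :: m') = 1 + pvRuns p true (d :: m') := by
                simp [pvRuns_cons, hc]
              rw [h3]
              have h4 := pvRuns_false_true p d m' hd
              omega
            · have hd' : p d = false := by simpa using hd
              have h2 : pvRuns p (p d) [c] = 1 := by simp [pvRuns, hd', hc]
              rw [h2]
              have h3 : pvRuns p false (c :: d :: m') = 1 + pvRuns p true (d :: m') := by
                simp [pvRuns_cons, hc]
              rw [h3]
              have h4 := pvRuns_false_true' p d m' hd'
              omega
          · have hc' : p c = false := by simpa using hc
            have h2 : pvRuns p (p d) [c] = 0 := by simp [pvRuns, hc']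
            rw [h2]
            have h3 : pvRuns p false (c :: d :: m') = pvRuns p false (d :: m') := by
              simp [pvRuns_cons, hc']
            rw [h3]
            omega

theorem pvFlip_M (c : Char) : pvM (pvFlip c) = pvQ c := by
  by_cases h : c = '-' <;> simp [pvFlip, pvM, pvQ, h]

theorem pvFlip_binary (c : Char) : pvFlip c = '+' ∨ pvFlip c = '-' := by
  by_cases h : c = '-' <;> simp [pvFlip, h]

theorem pvRuns_map_flip : ∀ (l : List Char) (b : Bool),
    pvRuns pvM b (l.map pvFlip) = pvRuns pvQ b l := by
  intro l
  induction l with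
  | nil => intro b; rfl
  | cons c m ih =>
      intro b
      simp only [List.map_cons, pvRuns_cons, pvFlip_M, ih]

theorem pvFoldB : ∀ (l : List Char) (acc : Int) (prev : Bool),
    (l.foldl pvStep (acc, prev)).1 = acc + (pvRuns pvQ (!prev) l : Int) := by
  intro l
  induction l with
  | nil => intro acc prev; simp [pvRuns]
  | cons c m ih =>
      intro acc prev
      rw [List.foldl_cons]
      by_cases hc : c = '-'
      · subst hc
        have hs : pvStep (acc, prev) '-' = (acc, true) := by
          simp [pvStep]
        rw [hs, ih, pvRuns_cons]
        simp [pvQ]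
      · have hq : pvQ c = true := by simp [pvQ, hc]
        by_cases hp : prev
        · subst hp
          have hs : pvStep (acc, true) c = (acc + 1, c == '-') := by
            simp [pvStep, hc]
          have hb : (c == '-') = false := by simp [hc]
          rw [hs, hb, ih, pvRuns_cons]
          rw [hq]
          simp
          omega
        · simp only [Bool.not_eq_true] at hp
          subst hp
          have hs : pvStep (acc, false) c = (acc, c == '-') := by
            simp [pvStep]
          have hb : (c == '-') = false := by simp [hc]
          rw [hs, hb, ih, pvRuns_cons]
          rw [hq]
          simp

theorem pvBlocks_eq (l : List Char) : pvBlocks l = (pvRuns pvQ false l : Int) := by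
  unfold pvBlocks
  rw [pvFoldB]
  simp

theorem pvAltCore_cons (c : Char) (rest : List Char) :
    pvAltCore (c :: rest)
      = if c = '-' then 1 + 2 * pvBlocks rest
        else if c = '+' then 2 + 2 * pvBlocks ((c :: rest).dropWhile (fun d => d == '+'))
        else 0 := rfl

-- reverse(stack) is the flipped reversal
theorem pvMapNeg : ∀ (v : List Char) (f : Char → Char),
    (PySem.List.pyRange 1 ((v.length : Int) + 1)).map (fun i => f (PySem.List.pyGetD v (-i) ' '))
      = v.reverse.map f := by
  intro v
  induction v with
  | nil => intro f; rfl
  | cons c w ih =>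
      intro f
      have hlen : ((c :: w).length : Int) + 1 = ((w.length : Int) + 1) + 1 := by
        simp only [List.length_cons]
        push_cast
        ring
      have hle : (1 : Int) ≤ (w.length : Int) + 1 := by omega
      rw [hlen, PySem.List.pyRange_one_succ_right hle, List.map_append]
      have h1 : (PySem.List.pyRange 1 ((w.length : Int) + 1)).map
          (fun i => f (PySem.List.pyGetD (c :: w) (-i) ' '))
          = (PySem.List.pyRange 1 ((w.length : Int) + 1)).map
          (fun i => f (PySem.List.pyGetD w (-i) ' ')) := by
        apply List.map_congr_left
        intro i hi
        rw [PySem.List.mem_pyRange_one] at hi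
        obtain ⟨hi1, hi2⟩ := hi
        have hk : i = ((i.toNat : Nat) : Int) := by omega
        have hk1 : 0 < i.toNat := by omega
        have hk2 : i.toNat ≤ w.length := by omega
        have hk2' : i.toNat ≤ (c :: w).length := by simp; omega
        rw [hk, PySem.List.pyGetD_neg_natCast (c :: w) i.toNat ' ' hk1 hk2',
          PySem.List.pyGetD_neg_natCast w i.toNat ' ' hk1 hk2]
        have hj : w.length + 1 - i.toNat = (w.length - i.toNat) + 1 := by
          omega
        simp [hj]
      rw [h1, ih]
      simp only [List.map_cons, List.map_nil]
      have h2 : PySem.List.pyGetD (c :: w) (-((w.length : Int) + 1)) ' ' = c := by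
        have he : ((w.length : Int) + 1) = (((w.length + 1 : Nat) : Nat) : Int) := by push_cast; ring
        rw [he, PySem.List.pyGetD_neg_natCast (c :: w) (w.length + 1) ' ' (by omega) (by simp)]
        simp
      rw [h2]
      simp

theorem pvReverseA_eq (v : List Char) : reverseA v = v.reverse.map pvFlip := by
  unfold reverseA
  rw [PySem.List.foldl_append_singleton_eq_map
    (f := fun i => if PySem.List.pyGetD v (-i) ' ' = '-' then '+' else '-')]
  rw [List.nil_append]
  have h : (fun i => if PySem.List.pyGetD v (-i) ' ' = '-' then '+' else '-')
       = (fun i => pvFlip (PySem.List.pyGetD v (-i) ' ')) := by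
    funext i; rfl
  rw [h, pvMapNeg]

-- replicate lemmas
theorem pvRuns_rep_of_neg (p : Char → Bool) (x : Char) (h : p x = false) :
    ∀ (k : Nat) (b : Bool), pvRuns p b (List.replicate k x) = 0 := by
  intro k
  induction k with
  | zero => intro b; rfl
  | succ m ih => intro b; simp [List.replicate_succ, pvRuns_cons, h, ih]

theorem pvRuns_rep_of_prev (p : Char → Bool) (x : Char) (h : p x = true) :
    ∀ (k : Nat), pvRuns p true (List.replicate k x) = 0 := by
  intro k
  induction k with
  | zero => rfl
  | succ m ih => simp [List.replicate_succ, pvRuns_cons, h, ih]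

theorem pvState_rep_pos (p : Char → Bool) (x : Char) (b : Bool) (k : Nat) (hk : 0 < k) :
    pvState p b (List.replicate k x) = p x := by
  obtain ⟨m, rfl⟩ : ∃ m, k = m + 1 := ⟨k - 1, by omega⟩
  rw [show List.replicate (m + 1) x = List.replicate m x ++ [x] by
    rw [← List.replicate_succ']]
  rw [pvState_append, pvState_singleton]

theorem pvRuns_rep_minus (k : Nat) (hk : 0 < k) :
    pvRuns pvM false (List.replicate k '-') = 1 := by
  obtain ⟨m, rfl⟩ : ∃ m, k = m + 1 := ⟨k - 1, by omega⟩
  rw [List.replicate_succ, pvRuns_cons]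
  rw [show pvM '-' = true from rfl, pvRuns_rep_of_prev pvM '-' rfl m]
  norm_num

-- the mutual block-count identity for lists ending in '-'
theorem pvS : ∀ (t : List Char), t.getLast? = some '-' →
    pvRuns pvM true t = pvRuns pvQ false t ∧ pvRuns pvM false t = 1 + pvRuns pvQ true t := by
  intro t
  induction t with
  | nil => intro h; simp at h
  | cons c t' ih =>
      intro h
      by_cases hc : c = '-'
      · subst hc
        cases t' with
        | nil => exact ⟨by decide, by decide⟩
        | cons d w =>
            have h' : (d :: w).getLast? = some '-' := by
              rw [List.getLast?_cons_cons] at h; exact h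
            obtain ⟨ih1, -⟩ := ih h'
            have eM : pvRuns pvM true ('-' :: d :: w) = pvRuns pvM true (d :: w) := by
              rw [pvRuns_cons, show pvM '-' = true from rfl]; simp
            have eM' : pvRuns pvM false ('-' :: d :: w) = 1 + pvRuns pvM true (d :: w) := by
              rw [pvRuns_cons, show pvM '-' = true from rfl]; simp
            have eQ : pvRuns pvQ false ('-' :: d :: w) = pvRuns pvQ false (d :: w) := by
              rw [pvRuns_cons, show pvQ '-' = false from rfl]; simp
            have eQ' : pvRuns pvQ true ('-' :: d :: w) = pvRuns pvQ false (d :: w) := by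
              rw [pvRuns_cons, show pvQ '-' = false from rfl]; simp
            exact ⟨by rw [eM, eQ, ih1], by rw [eM', eQ', ih1]⟩
      · have hM : pvM c = false := by simp [pvM, hc]
        have hQ : pvQ c = true := by simp [pvQ, hc]
        have ht' : t' ≠ [] := by
          intro he; subst he; simp at h; exact hc h
        have h' : t'.getLast? = some '-' := by
          cases t' with
          | nil => exact absurd rfl ht'
          | cons d w => rw [List.getLast?_cons_cons] at h; exact h
        obtain ⟨-, ih2⟩ := ih h'
        have eM : pvRuns pvM true (c :: t') = pvRuns pvM false t' := by
          rw [pvRuns_cons, hM]; simp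
        have eM' : pvRuns pvM false (c :: t') = pvRuns pvM false t' := by
          rw [pvRuns_cons, hM]; simp
        have eQ : pvRuns pvQ false (c :: t') = 1 + pvRuns pvQ true t' := by
          rw [pvRuns_cons, hQ]; simp
        have eQ' : pvRuns pvQ true (c :: t') = pvRuns pvQ true t' := by
          rw [pvRuns_cons, hQ]; simp
        exact ⟨by rw [eM, eQ, ih2], by rw [eM', eQ', ih2]⟩

-- the closed form for BINARY strings (everything reachable after one reverse)
def pvG (v : List Char) : Int :=
  2 * (pvRuns pvM false v : Int) - (if v.head? = some '-' then 1 else 0)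

theorem pvHead_dropWhile (p : Char → Bool) : ∀ (l : List Char) (c : Char),
    (l.dropWhile p).head? = some c → p c = false := by
  intro l
  induction l with
  | nil => intro c h; simp at h
  | cons d w ih =>
      intro c h
      by_cases hd : p d = true
      · rw [List.dropWhile_cons_of_pos hd] at h
        exact ih c h
      · rw [List.dropWhile_cons_of_neg hd] at h
        simp at h
        subst h
        simpa using hd

-- unfolding A once (with the reverse branch rewritten to the flipped reversal of the tail)
theorem pvA_unfold (v : List Char) :
    howManyFlipsL v =
      if v.length = 0 then 0
      else if PySem.List.pyGetD v (-1) ' ' = '-' ∧ PySem.List.pyGetD v 0 ' ' = '-' then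
        1 + howManyFlipsL ((v.tail.reverse).map pvFlip)
      else if PySem.List.pyGetD v (-1) ' ' = '-' ∧ PySem.List.pyGetD v 0 ' ' = '+' then
        1 + howManyFlipsL (badFlipA v)
      else
        howManyFlipsL v.dropLast := by
  rw [howManyFlipsL.eq_def]
  simp only [PySem.List.slice_to_neg_one, pvReverseA_eq, ← List.map_dropLast, List.dropLast_reverse]
  split_ifs with h0 h1 h2 <;> rfl

theorem pvA_nil : howManyFlipsL [] = 0 := by
  rw [pvA_unfold]; simp

theorem pvGetD_last (v : List Char) (c : Char) (h : v.getLast? = some c) :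
    PySem.List.pyGetD v (-1) ' ' = c := by
  have hne : v ≠ [] := by rintro rfl; simp at h
  rw [PySem.List.pyGetD_neg_one v ' ' hne]
  rw [List.getLast?_eq_some_getLast hne] at h
  exact Option.some.inj h

theorem pvGetLast_cons (c : Char) (l : List Char) (hl : l ≠ []) :
    (c :: l).getLast? = l.getLast? := by
  cases l with
  | nil => exact absurd rfl hl
  | cons d w => exact List.getLast?_cons_cons

theorem pvBin : ∀ (n : Nat) (v : List Char),
    2 * v.length + (if v.head? = some '+' then 1 else 0) ≤ n →
    (∀ c ∈ v, c = '+' ∨ c = '-') →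
    howManyFlipsL v = pvG v := by
  intro n
  induction n with
  | zero =>
      intro v hn _
      have hv : v = [] := by
        cases v with
        | nil => rfl
        | cons c w =>
            simp only [List.length_cons] at hn
            split_ifs at hn <;> omega
      subst hv
      simp [pvA_nil, pvG, pvRuns]
  | succ N IH =>
      intro v hn hbin
      rcases List.eq_nil_or_concat v with rfl | ⟨u, c, rfl⟩
      · simp [pvA_nil, pvG, pvRuns]
      · simp only [List.concat_eq_append] at hn hbin ⊢
        have hlastD : PySem.List.pyGetD (u ++ [c]) (-1) ' ' = c :=
          pvGetD_last _ _ List.getLast?_concat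
        have hlen0 : (u ++ [c]).length ≠ 0 := by simp
        rcases hbin c (by simp) with hc | hc
        · -- last char '+': else branch, drop it
          subst hc
          rw [pvA_unfold]
          rw [if_neg hlen0]
          rw [if_neg (by rw [hlastD]; rintro ⟨h, -⟩; exact absurd h (by decide))]
          rw [if_neg (by rw [hlastD]; rintro ⟨h, -⟩; exact absurd h (by decide))]
          rw [List.dropLast_concat]
          have hIH : howManyFlipsL u = pvG u := by
            apply IH u
            · have hl : u.length + 1 = (u ++ ['+']).length := by simp
              split_ifs <;> split_ifs at hn <;> omega
            · intro x hx; exact hbin x (by simp [hx])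
          rw [hIH]
          unfold pvG
          have hruns : pvRuns pvM false (u ++ ['+']) = pvRuns pvM false u := by
            rw [pvRuns_append]
            have h0 : pvRuns pvM (pvState pvM false u) ['+'] = 0 := by
              rw [pvRuns_cons, show pvM '+' = false from rfl]
              simp [pvRuns]
            omega
          rw [hruns]
          cases u with
          | nil => simp [pvRuns]
          | cons d w => simp
        · -- last char '-'
          subst hc
          cases u with
          | nil =>
              -- v = ['-']
              simp only [List.nil_append] at hlastD hlen0 ⊢
              rw [pvA_unfold]
              rw [if_neg (by simp)]
              rw [if_pos ⟨hlastD, PySem.List.pyGetD_zero_cons _ _ _⟩]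
              simp only [List.tail_cons, List.reverse_nil, List.map_nil, pvA_nil]
              unfold pvG
              rw [show pvRuns pvM false ['-'] = 1 from rfl]
              norm_num
          | cons e u' =>
              rw [List.cons_append] at hlastD hlen0 hbin hn ⊢
              set w : List Char := u' ++ ['-'] with hw
              have hwlast : w.getLast? = some '-' := List.getLast?_concat
              rcases hbin e (by simp) with he | he
              · -- head '+': badFlip branch
                subst he
                rw [pvA_unfold]
                rw [if_neg (by simp)]
                rw [if_neg (by rw [PySem.List.pyGetD_zero_cons]; rintro ⟨-, h⟩; exact absurd h (by decide))]
                rw [if_pos ⟨hlastD, PySem.List.pyGetD_zero_cons _ _ _⟩]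
                set k : Nat := (('+' :: w).takeWhile (fun c => c == '+')).length with hk
                set r : List Char := ('+' :: w).dropWhile (fun c => c == '+') with hr
                have hbf : badFlipA ('+' :: w) = List.replicate k '-' ++ r := pvBadFlipA_eq _
                have hsum : ('+' :: w).takeWhile (fun c => c == '+') ++ r = '+' :: w :=
                  List.takeWhile_append_dropWhile
                have htw : ('+' :: w).takeWhile (fun c => c == '+') = List.replicate k '+' := by
                  apply List.eq_replicate_of_mem
                  intro b hb
                  have hbb := List.mem_takeWhile_imp hb
                  simpa using hbb
                have hkpos : 0 < k := by
                  rw [hk, List.takeWhile_cons_of_pos (by simp)]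
                  simp
                have hvlast : ('+' :: w).getLast? = some '-' := by
                  rw [pvGetLast_cons _ _ (by simp [hw])]
                  exact hwlast
                obtain ⟨m, hm⟩ : ∃ m, k = m + 1 := ⟨k - 1, by omega⟩
                have hrne : r ≠ [] := by
                  intro hre
                  rw [hre, List.append_nil, htw] at hsum
                  have hgl : (List.replicate k '+').getLast? = some '+' := by
                    rw [hm, show List.replicate (m + 1) '+' = List.replicate m '+' ++ ['+'] by
                      rw [← List.replicate_succ']]
                    exact List.getLast?_concat
                  rw [hsum, hvlast] at hgl
                  simp at hgl
                have hrlast : r.getLast? = some '-' := by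
                  obtain ⟨x, hx⟩ : ∃ x, r.getLast? = some x := by
                    cases hgr : r.getLast? with
                    | none => exact absurd (by simpa using hgr) hrne
                    | some x => exact ⟨x, rfl⟩
                  have hgl : (('+' :: w).takeWhile (fun c => c == '+') ++ r).getLast? = r.getLast? := by
                    rw [List.getLast?_append, hx]
                    rfl
                  rw [hsum, hvlast] at hgl
                  exact hgl.symm
                obtain ⟨rc, r', hr'⟩ : ∃ rc r', r = rc :: r' := by
                  cases hrr : r with
                  | nil => exact absurd hrr hrne
                  | cons rc r' => exact ⟨rc, r', by rfl⟩
                have hrc : rc = '-' := by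
                  have h1 : (fun c => c == '+') rc = false :=
                    pvHead_dropWhile (fun c => c == '+') ('+' :: w) rc (by rw [← hr, hr']; rfl)
                  have h2 : rc ∈ '+' :: w := by
                    have hsub : r.Sublist ('+' :: w) := by rw [hr]; exact List.dropWhile_sublist _
                    exact hsub.mem (by rw [hr']; simp)
                  rcases hbin rc h2 with h3 | h3
                  · rw [h3] at h1; simp at h1
                  · exact h3
                subst hrc
                rw [hbf]
                have hh : (List.replicate k '-' ++ r).head? = some '-' := by
                  rw [hm, List.replicate_succ]
                  rfl
                have hIH : howManyFlipsL (List.replicate k '-' ++ r) = pvG (List.replicate k '-' ++ r) := by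
                  apply IH
                  · have hn' : 2 * w.length + 3 ≤ N + 1 := by
                      simp at hn
                      omega
                    have hL : (List.replicate k '-' ++ r).length = ('+' :: w).length := by
                      rw [← pvBadFlip_length ('+' :: w), hbf]
                    rw [hL, hh]
                    rw [if_neg (show ¬ ((some '-' : Option Char) = some '+') by decide)]
                    simp only [List.length_cons]
                    omega
                  · intro x hx
                    rcases List.mem_append.mp hx with hx1 | hx2
                    · right; exact List.eq_of_mem_replicate hx1
                    · apply hbin
                      have hsub : r.Sublist ('+' :: w) := by rw [hr]; exact List.dropWhile_sublist _
                      exact hsub.mem hx2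
                rw [hIH]
                have e1 : pvRuns pvM false (List.replicate k '-' ++ r) = 1 + pvRuns pvM true r' := by
                  rw [pvRuns_append, pvRuns_rep_minus k hkpos,
                    pvState_rep_pos pvM '-' false k hkpos,
                    show pvM '-' = true from rfl, hr', pvRuns_cons,
                    show pvM '-' = true from rfl]
                  simp
                have hv2 : '+' :: w = List.replicate k '+' ++ r := by
                  rw [← htw, hsum]
                have e2 : pvRuns pvM false ('+' :: w) = 1 + pvRuns pvM true r' := by
                  rw [hv2, pvRuns_append, pvRuns_rep_of_neg pvM '+' (by rfl) k,
                    pvState_rep_pos pvM '+' false k hkpos,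
                    show pvM '+' = false from rfl, hr', pvRuns_cons,
                    show pvM '-' = true from rfl]
                  simp
                unfold pvG
                rw [e1, e2, if_pos hh, if_neg (by simp)]
                push_cast
                ring
              · -- head '-': reverse branch
                subst he
                rw [pvA_unfold]
                rw [if_neg (by simp)]
                rw [if_pos ⟨hlastD, PySem.List.pyGetD_zero_cons _ _ _⟩]
                rw [List.tail_cons]
                have hIH : howManyFlipsL ((w.reverse).map pvFlip) = pvG ((w.reverse).map pvFlip) := by
                  apply IH
                  · have hn' : 2 * w.length + 2 ≤ N + 1 := by
                      simp only [List.head?_cons, List.length_cons] at hn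
                      rw [if_neg (by decide)] at hn
                      omega
                    simp only [List.length_map, List.length_reverse]
                    split_ifs <;> omega
                  · intro x hx
                    obtain ⟨y, _, rfl⟩ := List.mem_map.mp hx
                    exact pvFlip_binary y
                rw [hIH]
                have hrev : (w.reverse).head? = some '-' := by
                  rw [List.head?_reverse]
                  exact hwlast
                obtain ⟨rw', hrw⟩ : ∃ rw', w.reverse = '-' :: rw' := by
                  cases hwr : w.reverse with
                  | nil => rw [hwr] at hrev; simp at hrev
                  | cons a b =>
                      rw [hwr] at hrev
                      simp at hrev
                      exact ⟨b, by rw [hrev]⟩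
                have hG : pvG ((w.reverse).map pvFlip) = 2 * (pvRuns pvQ false w : Int) := by
                  unfold pvG
                  rw [if_neg (by rw [hrw]; simp [pvFlip])]
                  rw [pvRuns_map_flip, pvRuns_reverse]
                  simp
                have e : pvRuns pvM false ('-' :: w) = 1 + pvRuns pvM true w := by
                  rw [pvRuns_cons, show pvM '-' = true from rfl]
                  simp
                rw [hG]
                unfold pvG
                rw [e, if_pos (show ('-' :: w).head? = some '-' from rfl), (pvS w hwlast).1]
                push_cast
                ring

-- single-step characterizations used by the main theorem
theorem pvStepMinus (w : List Char) (h : ('-' :: w).getLast? = some '-') :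
    howManyFlipsL ('-' :: w) = 1 + 2 * (pvRuns pvQ false w : Int) := by
  rw [pvA_unfold]
  rw [if_neg (by simp)]
  rw [if_pos ⟨pvGetD_last _ _ h, PySem.List.pyGetD_zero_cons _ _ _⟩]
  rw [List.tail_cons]
  cases w with
  | nil =>
      simp [pvA_nil, pvRuns]
  | cons d w' =>
      have hwlast : (d :: w').getLast? = some '-' := by
        rw [List.getLast?_cons_cons] at h; exact h
      have hbin' : ∀ c ∈ ((d :: w').reverse).map pvFlip, c = '+' ∨ c = '-' := by
        intro x hx
        obtain ⟨y, _, rfl⟩ := List.mem_map.mp hx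
        exact pvFlip_binary y
      have hB := pvBin (2 * (((d :: w').reverse).map pvFlip).length + 1)
        (((d :: w').reverse).map pvFlip) (by split_ifs <;> omega) hbin'
      rw [hB]
      have hrev : ((d :: w').reverse).head? = some '-' := by
        rw [List.head?_reverse]
        exact hwlast
      obtain ⟨rw', hrw⟩ : ∃ rw', (d :: w').reverse = '-' :: rw' := by
        cases hwr : (d :: w').reverse with
        | nil => rw [hwr] at hrev; simp at hrev
        | cons a b =>
            rw [hwr] at hrev
            simp at hrev
            exact ⟨b, by rw [hrev]⟩
      unfold pvG
      rw [if_neg (by rw [hrw]; simp [pvFlip])]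
      rw [pvRuns_map_flip, pvRuns_reverse]
      simp

theorem pvStepPlus (w : List Char) (h : ('+' :: w).getLast? = some '-') :
    howManyFlipsL ('+' :: w)
      = 2 + 2 * (pvRuns pvQ false (('+' :: w).dropWhile (fun c => c == '+')) : Int) := by
  rw [pvA_unfold]
  rw [if_neg (by simp)]
  rw [if_neg (by rw [PySem.List.pyGetD_zero_cons]; rintro ⟨-, hx⟩; exact absurd hx (by decide))]
  rw [if_pos ⟨pvGetD_last _ _ h, PySem.List.pyGetD_zero_cons _ _ _⟩]
  set k : Nat := (('+' :: w).takeWhile (fun c => c == '+')).length with hk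
  set r : List Char := ('+' :: w).dropWhile (fun c => c == '+') with hr
  have hbf : badFlipA ('+' :: w) = List.replicate k '-' ++ r := pvBadFlipA_eq _
  have hsum : ('+' :: w).takeWhile (fun c => c == '+') ++ r = '+' :: w :=
    List.takeWhile_append_dropWhile
  have htw : ('+' :: w).takeWhile (fun c => c == '+') = List.replicate k '+' := by
    apply List.eq_replicate_of_mem
    intro b hb
    have hbb := List.mem_takeWhile_imp hb
    simpa using hbb
  have hkpos : 0 < k := by
    rw [hk, List.takeWhile_cons_of_pos (by simp)]
    simp
  obtain ⟨m, hm⟩ : ∃ m, k = m + 1 := ⟨k - 1, by omega⟩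
  have hrne : r ≠ [] := by
    intro hre
    rw [hre, List.append_nil, htw] at hsum
    have hgl : (List.replicate k '+').getLast? = some '+' := by
      rw [hm, show List.replicate (m + 1) '+' = List.replicate m '+' ++ ['+'] by
        rw [← List.replicate_succ']]
      exact List.getLast?_concat
    rw [hsum, h] at hgl
    simp at hgl
  have hrlast : r.getLast? = some '-' := by
    obtain ⟨x, hx⟩ : ∃ x, r.getLast? = some x := by
      cases hgr : r.getLast? with
      | none => exact absurd (by simpa using hgr) hrne
      | some x => exact ⟨x, rfl⟩
    have hgl : (('+' :: w).takeWhile (fun c => c == '+') ++ r).getLast? = r.getLast? := by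
      rw [List.getLast?_append, hx]
      rfl
    rw [hsum, h] at hgl
    exact hgl.symm
  have hbf2 : badFlipA ('+' :: w) = '-' :: (List.replicate m '-' ++ r) := by
    rw [hbf, hm, List.replicate_succ, List.cons_append]
  have hune : List.replicate m '-' ++ r ≠ [] := by
    intro hx
    rw [List.append_eq_nil_iff] at hx
    exact hrne hx.2
  have hlast2 : ('-' :: (List.replicate m '-' ++ r)).getLast? = some '-' := by
    rw [pvGetLast_cons _ _ hune, List.getLast?_append, hrlast]
    rfl
  rw [hbf2, pvStepMinus _ hlast2]
  have e : pvRuns pvQ false (List.replicate m '-' ++ r) = pvRuns pvQ false r := by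
    rw [pvRuns_append, pvRuns_rep_of_neg pvQ '-' (by rfl) m]
    have hst : pvState pvQ false (List.replicate m '-') = false := by
      cases m with
      | zero => rfl
      | succ mm =>
          rw [pvState_rep_pos pvQ '-' false (mm + 1) (by omega)]
          rfl
    rw [hst]
    omega
  rw [e]
  ring

-- facts about Source B's trailing strip
theorem pvStrip_last (u : List Char) :
    (((u ++ ['-']).reverse).dropWhile (fun c => c != '-')).reverse = u ++ ['-'] := by
  rw [List.reverse_append]
  simp only [List.reverse_cons, List.reverse_nil, List.nil_append, List.singleton_append]
  rw [List.dropWhile_cons_of_neg (by simp)]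
  simp

theorem pvStrip_prefix (l : List Char) :
    ((l.reverse.dropWhile (fun c => c != '-')).reverse) <+: l := by
  have h := (List.dropWhile_suffix (l := l.reverse) (fun c => c != '-')).reverse
  simpa using h

theorem pvAlt_drop (u : List Char) (c : Char) (hc : c ≠ '-') :
    howManyFlips_altL (u ++ [c]) = howManyFlips_altL u := by
  unfold howManyFlips_altL
  rw [List.reverse_append]
  simp only [List.reverse_cons, List.reverse_nil, List.nil_append, List.singleton_append]
  rw [List.dropWhile_cons_of_pos (by simp [hc])]

theorem pvAlt_head_ne (l : List Char) (e : Char) (hh : l.head? = some e)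
    (h1 : e ≠ '-') (h2 : e ≠ '+') : howManyFlips_altL l = 0 := by
  unfold howManyFlips_altL
  have hpre := pvStrip_prefix l
  cases hst : (l.reverse.dropWhile (fun c => c != '-')).reverse with
  | nil => rfl
  | cons f t' =>
      rw [hst] at hpre
      obtain ⟨ktail, hk⟩ := hpre
      rw [← hk] at hh
      simp at hh
      rw [pvAltCore_cons]
      rw [if_neg (by rw [hh]; exact h1), if_neg (by rw [hh]; exact h2)]

theorem pvMain : ∀ (n : Nat) (s : List Char), s.length ≤ n →
    howManyFlipsL s = howManyFlips_altL s := by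
  intro n
  induction n with
  | zero =>
      intro s hn
      have hs : s = [] := by
        cases s with
        | nil => rfl
        | cons c w => simp at hn
      subst hs
      rw [pvA_nil]
      rfl
  | succ N IH =>
      intro s hn
      rcases List.eq_nil_or_concat s with rfl | ⟨u, c, rfl⟩
      · rw [pvA_nil]; rfl
      · simp only [List.concat_eq_append] at hn ⊢
        by_cases hc : c = '-'
        · subst hc
          have hstrip : howManyFlips_altL (u ++ ['-']) = pvAltCore (u ++ ['-']) := by
            unfold howManyFlips_altL
            rw [pvStrip_last]
          cases u with
          | nil =>
              rw [List.nil_append] at hstrip ⊢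
              rw [pvStepMinus [] (by rfl), hstrip]
              rw [pvAltCore_cons, if_pos rfl]
              norm_num [pvBlocks, pvRuns]
          | cons e u' =>
              rw [List.cons_append] at hstrip hn ⊢
              set w : List Char := u' ++ ['-'] with hw
              have hwne : w ≠ [] := by simp [hw]
              have hwlast : w.getLast? = some '-' := List.getLast?_concat
              by_cases he1 : e = '-'
              · subst he1
                rw [pvStepMinus w (by rw [pvGetLast_cons _ _ hwne]; exact hwlast), hstrip]
                rw [pvAltCore_cons, if_pos rfl, pvBlocks_eq]
              · by_cases he2 : e = '+'
                · subst he2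
                  rw [pvStepPlus w (by rw [pvGetLast_cons _ _ hwne]; exact hwlast), hstrip]
                  rw [pvAltCore_cons, if_neg (show ¬ (('+' : Char) = '-') by decide), if_pos rfl,
                    pvBlocks_eq]
                · rw [pvA_unfold]
                  rw [if_neg (by simp)]
                  rw [if_neg (by rw [PySem.List.pyGetD_zero_cons]; rintro ⟨-, hx⟩; exact he1 hx)]
                  rw [if_neg (by rw [PySem.List.pyGetD_zero_cons]; rintro ⟨-, hx⟩; exact he2 hx)]
                  rw [show (e :: w).dropLast = e :: u' by
                    rw [hw, ← List.cons_append, List.dropLast_concat]]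
                  have hIH : howManyFlipsL (e :: u') = howManyFlips_altL (e :: u') := by
                    apply IH
                    have hlw : w.length = u'.length + 1 := by rw [hw]; simp
                    simp only [List.length_cons, hlw] at hn
                    simp only [List.length_cons]
                    omega
                  rw [hIH]
                  rw [pvAlt_head_ne (e :: u') e rfl he1 he2, hstrip]
                  rw [pvAltCore_cons, if_neg he1, if_neg he2]
        · have hlastD : PySem.List.pyGetD (u ++ [c]) (-1) ' ' = c :=
            pvGetD_last _ _ List.getLast?_concat
          rw [pvA_unfold]
          rw [if_neg (by simp)]
          rw [if_neg (by rw [hlastD]; rintro ⟨hx, -⟩; exact hc hx)]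
          rw [if_neg (by rw [hlastD]; rintro ⟨hx, -⟩; exact hc hx)]
          rw [List.dropLast_concat]
          have hIH : howManyFlipsL u = howManyFlips_altL u := by
            apply IH
            simp at hn
            omega
          rw [hIH, pvAlt_drop u c hc]

-- ===== VERDICT (by name: the statement is the Claim_ definition above) =====
theorem howManyFlips_spec : Claim_equal_howManyFlips := by
  intro stack _
  unfold Spec_howManyFlips howManyFlips howManyFlips_alt
  exact pvMain stack.toList.length stack.toList le_rfl
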